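-- pv_equiv track=rewrite | github.com/jalmx/generate_gift | src/g_gift.py | _clear_questions
-- ===== SOURCE A (Python) =====
-- def _clear_questions(txt):
--     content_raw = txt.replace("\t", "").split("\n")
--     content_pre = []
--
--     for line in content_raw:
--         if len(line) > 0:
--             content_pre.append(line)
--
--     start = False
--     content = []
--     for line in content_pre:
--         if str(line)[0].isdigit() or start:
--             start = True
--             content.append(line)
--
--     return content
-- ===== SOURCE B (Python) =====
-- def _clear_questions(txt):
--     lines = [l for l in txt.replace("\t", "").split("\n") if l]
--     for i, l in enumerate(lines):
--         if l[0].isdigit():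
--             return lines[i:]
--     return []
-- ===== Notes on version B (the rewrite author's own statement) =====
-- stated objective: simpler
-- what changed: Replaces the flag-carrying second accumulation loop with locate-the-first-digit-line-then-slice over a comprehension-filtered list.
import Mathlib
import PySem

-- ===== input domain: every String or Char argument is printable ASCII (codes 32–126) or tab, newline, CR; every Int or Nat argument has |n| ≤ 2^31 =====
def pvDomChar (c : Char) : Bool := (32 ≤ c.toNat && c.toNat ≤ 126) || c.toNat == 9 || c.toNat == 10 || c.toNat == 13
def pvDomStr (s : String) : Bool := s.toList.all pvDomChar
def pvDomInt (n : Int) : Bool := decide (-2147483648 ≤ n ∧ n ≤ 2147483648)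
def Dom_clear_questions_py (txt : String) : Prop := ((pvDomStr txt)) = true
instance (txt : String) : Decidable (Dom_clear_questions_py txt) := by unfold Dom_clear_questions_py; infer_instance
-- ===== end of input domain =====

-- B replaces A's flag-carrying second loop with locate-first-digit-line-then-slice (objective: simpler).

-- line[0].isdigit() (lines here are always non-empty, so pyGet? is some)
def pvHeadDigit (line : String) : Bool :=
  match PySem.Str.pyGet? line 0 with
  | some c => PySem.Chars.isdigit c
  | none => false

-- ===== PORT A =====
def clear_questions_py (txt : String) : List String :=
  let content_raw := (PySem.Str.split? (PySem.Str.replace txt "\t" "") "\n").getD []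
  let content_pre := content_raw.foldl (fun acc line => if PySem.Str.len line > 0 then acc ++ [line] else acc) []
  let st := content_pre.foldl
    (fun (st : Bool × List String) line =>
      if pvHeadDigit line || st.1 then (true, st.2 ++ [line]) else st)
    (false, [])
  st.2

-- ===== PORT B =====
-- the enumerate-loop of Source B: first line with digit head starts the returned slice lines[i:]
def pvLocateSlice : List String → List String
  | [] => []
  | l :: rest => if pvHeadDigit l then l :: rest else pvLocateSlice rest

def clear_questions_py_alt (txt : String) : List String :=
  let lines := ((PySem.Str.split? (PySem.Str.replace txt "\t" "") "\n").getD []).filter (fun l => l ≠ "")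
  pvLocateSlice lines

-- ===== PRECONDITION & SPEC =====
def Spec_clear_questions_py (txt : String) (out : List String) : Prop := out = clear_questions_py_alt txt
instance (txt : String) (out : List String) : Decidable (Spec_clear_questions_py txt out) := by unfold Spec_clear_questions_py; infer_instance

-- ===== CLAIM (what is proved, stated in full; the proofs are below) =====
def Claim_equal_clear_questions_py : Prop := ∀ (txt : String), Dom_clear_questions_py txt → Spec_clear_questions_py txt (clear_questions_py txt)

-- ===== LEMMAS AND PROOFS =====

-- A's first loop is a filter
theorem pv_filter_loop (ls : List String) (acc : List String) :
    ls.foldl (fun acc line => if PySem.Str.len line > 0 then acc ++ [line] else acc) acc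
      = acc ++ ls.filter (fun l => l ≠ "") := by
  induction ls generalizing acc with
  | nil => simp
  | cons l ls ih =>
    simp only [List.foldl_cons, List.filter_cons, ih]
    by_cases h : l = ""
    · simp [h, PySem.Str.len]
    · have hp : 0 < l.length := by
        cases hl : l.toList with
        | nil => exact absurd (String.toList_eq_nil_iff.mp hl) h
        | cons c cs => simp [← String.length_toList, hl]
      simp [h, PySem.Str.len, hp]

-- once start is true, A's second loop appends everything
theorem pv_loop_true (ls : List String) (acc : List String) :
    (ls.foldl (fun (st : Bool × List String) line =>
        if pvHeadDigit line || st.1 then (true, st.2 ++ [line]) else st) (true, acc)).2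
      = acc ++ ls := by
  induction ls generalizing acc with
  | nil => simp
  | cons l ls ih =>
    simp only [List.foldl_cons, Bool.or_true, if_true]
    rw [ih]
    simp

-- from start = false, A's second loop computes B's locate-then-slice
theorem pv_loop_false (ls : List String) :
    (ls.foldl (fun (st : Bool × List String) line =>
        if pvHeadDigit line || st.1 then (true, st.2 ++ [line]) else st) (false, [])).2
      = pvLocateSlice ls := by
  induction ls with
  | nil => simp [pvLocateSlice]
  | cons l ls ih =>
    simp only [List.foldl_cons, Bool.or_false]
    by_cases h : pvHeadDigit l = true
    · rw [if_pos h, pv_loop_true]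
      simp [pvLocateSlice, h]
    · rw [if_neg (by simp [h])]
      rw [ih]
      simp [pvLocateSlice, h]

-- ===== VERDICT (by name: the statement is the Claim_ definition above) =====
theorem clear_questions_py_spec : Claim_equal_clear_questions_py := by
  intro txt _
  unfold Spec_clear_questions_py clear_questions_py clear_questions_py_alt
  simp only [pv_filter_loop, List.nil_append, pv_loop_false]
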